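-- pv_equiv track=rewrite | github.com/BrianLees/python_static_site_generator | src/functions.py | text_to_heading
-- ===== SOURCE A (Python) =====
-- def text_to_heading(text):
--     cleaned_text = ""
--     counter = 0
--     for ch in text:
--         if ch == "#":
--             counter += 1
--         else:
--             cleaned_text += ch
--
--     return counter, cleaned_text.lstrip()
-- ===== SOURCE B (Python) =====
-- def text_to_heading(text):
--     parts = text.split("#")
--     return len(parts) - 1, "".join(parts).lstrip()
-- ===== Notes on version B (the rewrite author's own statement) =====
-- stated objective: faster
-- what changed: Instead of a fused per-character counting/accumulating Python loop, B splits the string on the marker and derives the count as the number of fields minus one and the cleaned text as the join of the fields, lstripped; all scans run in C.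
import Mathlib
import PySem

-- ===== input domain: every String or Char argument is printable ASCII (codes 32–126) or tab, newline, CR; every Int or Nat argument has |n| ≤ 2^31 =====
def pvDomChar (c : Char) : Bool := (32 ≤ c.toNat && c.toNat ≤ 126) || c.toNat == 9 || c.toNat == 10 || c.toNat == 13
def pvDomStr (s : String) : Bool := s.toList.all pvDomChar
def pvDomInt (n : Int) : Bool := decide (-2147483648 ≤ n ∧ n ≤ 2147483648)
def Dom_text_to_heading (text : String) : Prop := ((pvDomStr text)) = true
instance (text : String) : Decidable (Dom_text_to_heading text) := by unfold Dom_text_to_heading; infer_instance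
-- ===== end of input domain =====

-- B replaces A's fused per-character counting/accumulating loop by a split on '#': the count is the number of fields minus one, the cleaned text is the join of the fields, lstripped (same asymptotic cost; measured faster by a constant factor: library scans instead of a Python-level loop).

-- ===== PORT A =====
-- the for-loop over the characters, accumulating (cleaned_text, counter)
def text_to_heading (text : String) : Int × String :=
  let st := text.toList.foldl
    (fun (p : String × Int) ch => if ch == '#' then (p.1, p.2 + 1) else (p.1.push ch, p.2))
    ("", 0)
  (st.2, PySem.Str.lstrip st.1)

-- ===== PORT B =====
-- text.split("#"): PySem.Str.split? returns none only for an empty separator, which never happens here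
def text_to_heading_alt (text : String) : Int × String :=
  let parts := (PySem.Str.split? text "#").getD []
  ((parts.length : Int) - 1, PySem.Str.lstrip (PySem.Str.join "" parts))

-- ===== PRECONDITION & SPEC =====
def Spec_text_to_heading (text : String) (out : Int × String) : Prop := out = text_to_heading_alt text
instance (text : String) (out : Int × String) : Decidable (Spec_text_to_heading text out) := by unfold Spec_text_to_heading; infer_instance

-- ===== CLAIM (what is proved, stated in full; the proofs are below) =====
def Claim_equal_text_to_heading : Prop := ∀ (text : String), Dom_text_to_heading text → Spec_text_to_heading text (text_to_heading text)

-- ===== LEMMAS AND PROOFS =====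

-- A's loop computes (filter, count)
lemma foldA (l : List Char) (s : String) (n : Int) :
    l.foldl (fun (p : String × Int) ch => if ch == '#' then (p.1, p.2 + 1) else (p.1.push ch, p.2)) (s, n)
      = (String.ofList (s.toList ++ l.filter (fun c => !(c == '#'))), n + l.count '#') := by
  induction l generalizing s n with
  | nil =>
    simp only [List.foldl_nil, List.filter_nil, List.append_nil, List.count_nil]
    rw [Prod.mk.injEq]
    constructor
    · rw [← String.toList_inj]; simp
    · omega
  | cons c t ih =>
    simp only [List.foldl_cons]
    by_cases hc : c = '#'
    · subst hc
      rw [if_pos (by simp)]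
      rw [ih]
      simp
      omega
    · rw [if_neg (by simpa using hc)]
      rw [ih]
      rw [Prod.mk.injEq]
      constructor
      · rw [← String.toList_inj]
        simp [String.toList_push, hc]
      · simp [hc]

-- number of fields produced by splitOn.go on a one-char separator
lemma splitOn_go_length (fuel : Nat) (l cur : List Char) (acc : List (List Char))
    (h : l.length ≤ fuel) :
    (PySem.Chars.splitOn.go ['#'] fuel l cur acc).length = acc.length + 1 + l.count '#' := by
  induction fuel generalizing l cur acc with
  | zero =>
    have hl : l = [] := by cases l with | nil => rfl | cons c t => simp at h
    subst hl; simp [PySem.Chars.splitOn.go]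
  | succ fuel ih =>
    cases l with
    | nil => simp [PySem.Chars.splitOn.go]
    | cons c t =>
      simp only [PySem.Chars.splitOn.go]
      simp only [List.length_cons] at h
      by_cases hc : c = '#'
      · subst hc
        rw [if_pos (by simp [List.isPrefixOf])]
        have hd : (List.drop ['#'].length ('#' :: t)) = t := by simp
        rw [hd, ih _ _ _ (by omega)]
        simp; omega
      · rw [if_neg (by simp [List.isPrefixOf]; exact fun hx => hc hx.symm)]
        rw [ih _ _ _ (by omega)]
        simp [hc]

-- concatenation of the fields produced by splitOn.go on a one-char separator
lemma splitOn_go_flatten (fuel : Nat) (l cur : List Char) (acc : List (List Char))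
    (h : l.length ≤ fuel) :
    (PySem.Chars.splitOn.go ['#'] fuel l cur acc).flatten
      = acc.reverse.flatten ++ cur.reverse ++ l.filter (fun c => !(c == '#')) := by
  induction fuel generalizing l cur acc with
  | zero =>
    have hl : l = [] := by cases l with | nil => rfl | cons c t => simp at h
    subst hl; simp [PySem.Chars.splitOn.go]
  | succ fuel ih =>
    cases l with
    | nil => simp [PySem.Chars.splitOn.go]
    | cons c t =>
      simp only [PySem.Chars.splitOn.go]
      simp only [List.length_cons] at h
      by_cases hc : c = '#'
      · subst hc
        rw [if_pos (by simp [List.isPrefixOf])]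
        have hd : (List.drop ['#'].length ('#' :: t)) = t := by simp
        rw [hd, ih _ _ _ (by omega)]
        simp
      · rw [if_neg (by simp [List.isPrefixOf]; exact fun hx => hc hx.symm)]
        rw [ih _ _ _ (by omega)]
        simp [hc]

lemma join_empty_sep (parts : List (List Char)) :
    PySem.Chars.join [] parts = parts.flatten := by
  induction parts with
  | nil => simp [PySem.Chars.join, List.intercalate]
  | cons p ps ih =>
    cases ps with
    | nil => simp [PySem.Chars.join, List.intercalate]
    | cons q qs =>
      simp only [PySem.Chars.join, List.intercalate] at *
      simp [List.intersperse] at *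
      simp [ih]

lemma splitOn_hash_length (l : List Char) :
    (PySem.Chars.splitOn l ['#']).length = 1 + l.count '#' := by
  unfold PySem.Chars.splitOn
  rw [splitOn_go_length _ _ _ _ (by omega)]
  simp

lemma splitOn_hash_flatten (l : List Char) :
    (PySem.Chars.splitOn l ['#']).flatten = l.filter (fun c => !(c == '#')) := by
  unfold PySem.Chars.splitOn
  rw [splitOn_go_flatten _ _ _ _ (by omega)]
  simp

-- ===== VERDICT (by name: the statement is the Claim_ definition above) =====
theorem text_to_heading_spec : Claim_equal_text_to_heading := by
  intro text _
  unfold Spec_text_to_heading text_to_heading text_to_heading_alt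
  rw [foldA]
  have hsep : ("#" : String).toList = ['#'] := by decide
  have hsplit : PySem.Str.split? text "#" = some ((PySem.Chars.splitOn text.toList ['#']).map String.ofList) := by
    simp only [PySem.Str.split?, PySem.Chars.split?, hsep, List.isEmpty_cons,
      Bool.false_eq_true, if_false, Option.map_some]
  rw [hsplit]
  simp only [Option.getD_some]
  rw [Prod.mk.injEq]
  constructor
  · rw [List.length_map, splitOn_hash_length]
    push_cast; omega
  · rw [← String.toList_inj]
    simp only [PySem.Str.toList_lstrip]
    apply congrArg
    rw [PySem.Str.join]
    have : ("" : String).toList = [] := by decide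
    simp only [String.toList_ofList, this, join_empty_sep]
    rw [List.map_map]
    have hm : (PySem.Chars.splitOn text.toList ['#']).map (String.toList ∘ String.ofList)
        = PySem.Chars.splitOn text.toList ['#'] := by
      simp [Function.comp_def]
    rw [hm, splitOn_hash_flatten]
    simp
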